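-- pv_equiv track=rewrite | github.com/eleshock/algorithm | 정글알고리즘/2주차/boj16564_히오스프로게이머.py | count
-- ===== SOURCE A (Python) =====
-- def count(mid, arr): # 레벨 낮은애들 목표레벨까지 채우는데 얼마나 필요한가?
--     sum = 0 # 초기화
--     for chr in arr: # 성권이가 가진 캐릭터 레벨들 중에서
--         if chr < mid: # 목표레벨보다 낮은 캐릭터일 경우
--             sum += mid - chr # sum에 필요량을 포함시켜줌
--         else: # 목표레벨보다 높은 애들부터는 안 필요하므로 반복문 빠져나옴
--             break
--     return sum # 누적된 sum을 반환함
-- ===== SOURCE B (Python) =====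
-- def count(mid, arr):
--     # index of the first element >= mid (the loop in A breaks there); len(arr) if none
--     i = next((k for k, v in enumerate(arr) if v >= mid), len(arr))
--     # deficit of that prefix in closed form
--     return mid * i - sum(arr[:i])
-- ===== Notes on version B (the rewrite author's own statement) =====
-- stated objective: alternative
-- what changed: Replaces the accumulate-and-break loop by locating the first element >= mid and returning the closed form mid*i - sum(prefix).
import Mathlib
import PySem

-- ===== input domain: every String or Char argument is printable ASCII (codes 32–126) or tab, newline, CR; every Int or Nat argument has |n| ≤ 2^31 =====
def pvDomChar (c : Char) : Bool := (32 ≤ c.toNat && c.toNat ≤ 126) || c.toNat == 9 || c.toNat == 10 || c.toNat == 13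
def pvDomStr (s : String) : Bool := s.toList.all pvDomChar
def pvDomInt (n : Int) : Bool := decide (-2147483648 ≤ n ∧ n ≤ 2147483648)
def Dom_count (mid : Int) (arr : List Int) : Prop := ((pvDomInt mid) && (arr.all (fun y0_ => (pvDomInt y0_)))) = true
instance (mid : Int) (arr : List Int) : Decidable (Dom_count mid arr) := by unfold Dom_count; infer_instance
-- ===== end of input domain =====

-- B replaces A's accumulate-and-break loop by locating the first element ≥ mid and a closed form; objective: alternative.

-- ===== PORT A =====
-- the for-loop with its running sum and break
def countGo (mid : Int) (s : Int) : List Int → Int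
  | [] => s
  | c :: t => if c < mid then countGo mid (s + (mid - c)) t else s

def count (mid : Int) (arr : List Int) : Int := countGo mid 0 arr

-- ===== PORT B =====
-- index (as in enumerate) of the first element ≥ mid; k is the running index
def firstGE (mid : Int) (k : Nat) : List Int → Nat
  | [] => k
  | v :: t => if v ≥ mid then k else firstGE mid (k + 1) t

def count_alt (mid : Int) (arr : List Int) : Int :=
  let i := firstGE mid 0 arr
  mid * (i : Int) - ((arr.take i).foldl (· + ·) 0)

-- ===== PRECONDITION & SPEC =====
def Spec_count (mid : Int) (arr : List Int) (out : Int) : Prop := out = count_alt mid arr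
instance (mid : Int) (arr : List Int) (out : Int) : Decidable (Spec_count mid arr out) := by unfold Spec_count; infer_instance

-- ===== CLAIM (what is proved, stated in full; the proofs are below) =====
def Claim_equal_count : Prop := ∀ (mid : Int) (arr : List Int), Dom_count mid arr → Spec_count mid arr (count mid arr)

-- ===== LEMMAS AND PROOFS =====

theorem firstGE_shift (mid : Int) (k : Nat) (l : List Int) :
    firstGE mid k l = k + firstGE mid 0 l := by
  induction l generalizing k with
  | nil => simp [firstGE]
  | cons v t ih =>
    simp only [firstGE]
    split_ifs with h
    · simp
    · rw [ih (k+1), ih 1]; omega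

theorem countGo_eq (mid : Int) (l : List Int) (s : Int) :
    countGo mid s l = s + (mid * ((firstGE mid 0 l : Nat) : Int) - ((l.take (firstGE mid 0 l)).foldl (· + ·) 0)) := by
  induction l generalizing s with
  | nil => simp [countGo, firstGE]
  | cons c t ih =>
    by_cases h : c < mid
    · have hge : ¬ c ≥ mid := by omega
      simp only [countGo, firstGE, if_pos h, if_neg hge]
      have hk : firstGE mid (0 + 1) t = firstGE mid 0 t + 1 := by
        rw [firstGE_shift]; omega
      rw [ih, hk]
      have hfold : ∀ (a : Int) (l' : List Int), l'.foldl (· + ·) a = a + l'.foldl (· + ·) 0 := by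
        intro a l'
        induction l' generalizing a with
        | nil => simp
        | cons x xs ih2 => simp only [List.foldl]; rw [ih2 (a + x), ih2 (0 + x)]; ring
      simp only [List.take_succ_cons, List.foldl]
      rw [hfold (0 + c)]
      push_cast
      ring
    · have hge : c ≥ mid := by omega
      simp only [countGo, firstGE, if_neg h, if_pos hge, List.take_zero, List.foldl_nil,
        Nat.cast_zero, mul_zero, sub_zero, add_zero]

-- ===== VERDICT (by name: the statement is the Claim_ definition above) =====
theorem count_spec : Claim_equal_count := by
  intro mid arr _
  unfold Spec_count count count_alt
  rw [countGo_eq]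
  ring
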